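-- pv_equiv track=rewrite | github.com/iwootten/adventofcode | 2021/day10.py | get_autocomplete
-- ===== SOURCE A (Python) =====
-- MATCHING = {"(": ")", "{": "}", "[": "]", "<": ">"}
--
-- def get_autocomplete(line):
--     chunks = []
--     to_complete = []
--     for c in line:
--         if c in ["(", "[", "{", "<"]:
--             chunks.append(c)
--         else:
--             chunks.pop()
--     while chunks:
--         to_complete.append(MATCHING[chunks.pop()])
--     return to_complete
-- ===== SOURCE B (Python) =====
-- MATCHING = {"(": ")", "{": "}", "[": "]", "<": ">"}
--
-- def get_autocomplete(line):
--     # Cancel matched chunks by string reduction: repeatedly delete an opener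
--     # that is immediately followed by a non-opener (its closer), stepping back
--     # one position since a new adjacent pair may appear.  The residue is the
--     # still-open brackets from outermost to innermost; completing them means
--     # closing them innermost-first.
--     s = list(line)
--     i = 0
--     while i < len(s):
--         if s[i] in MATCHING and i + 1 < len(s) and s[i + 1] not in MATCHING:
--             del s[i:i + 2]
--             i = max(i - 1, 0)
--         else:
--             i += 1
--     return [MATCHING[c] for c in reversed(s)]
-- ===== Notes on version B (the rewrite author's own statement) =====
-- stated objective: alternative
-- what changed: B replaces A's opener stack plus second pop-and-translate while-loop by in-place string reduction: it repeatedly deletes an opener immediately followed by a non-opener (backtracking one position), then maps the residue of still-open brackets, reversed, through MATCHING.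
import Mathlib
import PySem

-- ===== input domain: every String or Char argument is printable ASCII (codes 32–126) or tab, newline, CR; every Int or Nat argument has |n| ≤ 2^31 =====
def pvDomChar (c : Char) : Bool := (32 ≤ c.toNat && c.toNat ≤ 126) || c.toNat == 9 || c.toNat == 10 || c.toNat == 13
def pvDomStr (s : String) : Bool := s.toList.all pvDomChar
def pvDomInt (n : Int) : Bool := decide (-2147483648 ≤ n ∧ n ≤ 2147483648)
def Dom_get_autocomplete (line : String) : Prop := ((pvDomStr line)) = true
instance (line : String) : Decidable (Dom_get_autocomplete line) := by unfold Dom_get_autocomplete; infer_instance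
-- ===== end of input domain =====

-- B cancels matched chunks by in-place string reduction instead of A's opener stack and
-- second pop-and-translate loop (alternative algorithm; outside Pre_ A raises IndexError
-- and B raises KeyError — both excluded).

-- ===== PORT A =====
def pvMATCHING : PySem.Dict Char String :=
  PySem.Dict.ofList [('(', ")"), ('{', "}"), ('[', "]"), ('<', ">")]

def pvIsOpen (c : Char) : Bool := c == '(' || c == '[' || c == '{' || c == '<'

-- Python list 'chunks' (append/pop at the end) is represented head-first: head = top of the
-- stack.  'chunks.pop()' on an empty list raises IndexError in Python — those inputs are
-- outside Pre_; here tail [] = [].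
def pvStepA (s : List Char) (c : Char) : List Char :=
  if pvIsOpen c then c :: s else s.tail

-- the second while-loop: pop each remaining opener and look its closer up in MATCHING
def pvDrain : List Char → List String
  | [] => []
  | c :: rest => PySem.Dict.getD pvMATCHING c "" :: pvDrain rest

def get_autocomplete (line : String) : List String :=
  pvDrain (line.toList.foldl pvStepA [])

-- ===== PORT B =====
-- 's[j] in MATCHING' (index guarded by the loop condition, as in Source B)
def pvInM (s : List Char) (j : Nat) : Bool :=
  PySem.Dict.contains pvMATCHING (s.getD j ' ')

-- Source B's while-loop: 'del s[i:i+2]' = take i ++ drop (i+2); 'i = max(i-1, 0)' = Nat i - 1.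
-- Structural recursion on the decreasing measure 3*|s| - i, passed in as 'fuel'
-- (pv_loop_main below is proved for any sufficient fuel, so the 0-case is unreachable).
def pvLoop (fuel : Nat) (s : List Char) (i : Nat) : List Char :=
  match fuel with
  | 0 => s
  | fuel + 1 =>
    if i < s.length then
      if pvInM s i = true ∧ i + 1 < s.length ∧ pvInM s (i + 1) = false then
        pvLoop fuel (s.take i ++ s.drop (i + 2)) (i - 1)
      else
        pvLoop fuel s (i + 1)
    else s

-- '[MATCHING[c] for c in reversed(s)]'; in Python MATCHING[c] raises KeyError on a leftover
-- non-opener, which happens exactly outside Pre_ — inside Pre_ 'getD' is exact.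
def get_autocomplete_alt (line : String) : List String :=
  ((pvLoop (3 * line.toList.length + 1) line.toList 0).reverse).map
    (fun c => PySem.Dict.getD pvMATCHING c "")

-- ===== PRECONDITION & SPEC =====
-- Pre_ excludes exactly the inputs on which Python's A raises IndexError (a pop from an
-- empty stack: some prefix contains more non-openers than openers); B raises KeyError there.
def Pre_get_autocomplete (line : String) : Prop :=
  ∀ p ∈ line.toList.inits, p.length ≤ 2 * p.countP pvIsOpen

instance (line : String) : Decidable (Pre_get_autocomplete line) := by
  unfold Pre_get_autocomplete; infer_instance

def pvWitness_get_autocomplete : String := "<{([](x"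

def Spec_get_autocomplete (line : String) (out : List String) : Prop := out = get_autocomplete_alt line
instance (line : String) (out : List String) : Decidable (Spec_get_autocomplete line out) := by unfold Spec_get_autocomplete; infer_instance

-- ===== CLAIM (what is proved, stated in full; the proofs are below) =====
def Claim_equal_get_autocomplete : Prop := ∀ (line : String), Dom_get_autocomplete line → Pre_get_autocomplete line → Spec_get_autocomplete line (get_autocomplete line)

-- ===== LEMMAS AND PROOFS =====

theorem pv_contains_eq_isOpen (c : Char) :
    PySem.Dict.contains pvMATCHING c = pvIsOpen c := by
  have h : pvMATCHING.items = [('(', ")"), ('{', "}"), ('[', "]"), ('<', ">")] := by decide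
  simp only [PySem.Dict.contains, h, List.any, pvIsOpen]
  cases h1 : '(' == c <;> cases h2 : '{' == c <;> cases h3 : '[' == c <;> cases h4 : '<' == c <;>
    simp_all [BEq.comm]

theorem pv_inM_eq (s : List Char) (j : Nat) : pvInM s j = pvIsOpen (s.getD j ' ') := by
  simp [pvInM, pv_contains_eq_isOpen]

theorem pv_drain_eq_map (s : List Char) :
    pvDrain s = s.map (fun c => PySem.Dict.getD pvMATCHING c "") := by
  induction s with
  | nil => rfl
  | cons c rest ih => simp [pvDrain, ih]

-- every prefix has at least as many openers as non-openers
def pvBal (l : List Char) : Prop :=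
  ∀ n : Nat, (l.take n).length ≤ 2 * (l.take n).countP pvIsOpen

theorem pv_decomp (s : List Char) (i : Nat) (h : i + 1 < s.length) :
    s = s.take i ++ s.getD i ' ' :: s.getD (i + 1) ' ' :: s.drop (i + 2) := by
  rw [List.getD_eq_getElem s ' ' (by omega), List.getD_eq_getElem s ' ' h]
  conv_lhs => rw [← List.take_append_drop i s]
  congr 1
  rw [List.drop_eq_getElem_cons (l := s) (by omega)]
  congr 1
  exact List.drop_eq_getElem_cons h

-- deleting an adjacent (opener, non-opener) pair does not change A's first loop:
-- the push is immediately undone by the pop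
theorem pv_foldl_pair (u v : List Char) (o x : Char)
    (ho : pvIsOpen o = true) (hx : pvIsOpen x = false) (init : List Char) :
    (u ++ o :: x :: v).foldl pvStepA init = (u ++ v).foldl pvStepA init := by
  simp only [List.foldl_append, List.foldl_cons]
  have h1 : pvStepA (u.foldl pvStepA init) o = o :: u.foldl pvStepA init := by
    simp [pvStepA, ho]
  have h2 : pvStepA (o :: u.foldl pvStepA init) x = u.foldl pvStepA init := by
    simp [pvStepA, hx]
  rw [h1, h2]

theorem pv_foldl_del (s : List Char) (i : Nat) (h : i + 1 < s.length)
    (ho : pvIsOpen (s.getD i ' ') = true) (hx : pvIsOpen (s.getD (i + 1) ' ') = false)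
    (init : List Char) :
    (s.take i ++ s.drop (i + 2)).foldl pvStepA init = s.foldl pvStepA init := by
  conv_rhs => rw [pv_decomp s i h]
  exact (pv_foldl_pair _ _ _ _ ho hx init).symm

-- deleting such a pair preserves the prefix balance
theorem pv_bal_del (s : List Char) (i : Nat) (h : i + 1 < s.length)
    (ho : pvIsOpen (s.getD i ' ') = true) (hx : pvIsOpen (s.getD (i + 1) ' ') = false)
    (hb : pvBal s) : pvBal (s.take i ++ s.drop (i + 2)) := by
  intro n
  have hlen : (s.take i).length = i := by simp; omega
  by_cases hn : n ≤ i
  · have : (s.take i ++ s.drop (i + 2)).take n = s.take n := by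
      rw [List.take_append, hlen]
      have h0 : n - i = 0 := by omega
      simp [h0, List.take_take, hn]
    rw [this]; exact hb n
  · have hb2 := hb (n + 2)
    conv at hb2 => rw [pv_decomp s i h]
    rw [List.take_append, hlen] at hb2 ⊢
    have h1 : (s.take i).take (n + 2) = s.take i := List.take_of_length_le (by omega)
    have h2 : (s.take i).take n = s.take i := List.take_of_length_le (by omega)
    have h3 : n + 2 - i = (n - i) + 2 := by omega
    rw [h1] at hb2
    rw [h2]
    rw [h3] at hb2
    simp only [List.take_succ_cons, List.length_append, List.countP_append,
      List.countP_cons, List.length_cons, List.length_take, List.length_drop,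
      ho, hx] at hb2 ⊢
    simp at hb2
    omega

-- combined loop invariant: given enough fuel, the reduction preserves the balance and
-- A's fold, and on return no opener below the scan point is followed by a non-opener
theorem pv_loop_main (fuel : Nat) : ∀ (s : List Char) (i : Nat),
    3 * s.length - i < fuel →
    (∀ j, j + 1 ≤ i → j + 1 < s.length → pvInM s j = true → pvInM s (j + 1) = true) →
    pvBal s →
    pvBal (pvLoop fuel s i)
    ∧ (∀ init, (pvLoop fuel s i).foldl pvStepA init = s.foldl pvStepA init)
    ∧ (∀ j, j + 1 < (pvLoop fuel s i).length → pvInM (pvLoop fuel s i) j = true →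
        pvInM (pvLoop fuel s i) (j + 1) = true) := by
  induction fuel with
  | zero => intro s i hf; omega
  | succ fuel ih =>
      intro s i hf hP hb
      by_cases h : i < s.length
      · by_cases hc : pvInM s i = true ∧ i + 1 < s.length ∧ pvInM s (i + 1) = false
        · rw [pvLoop, if_pos h, if_pos hc]
          obtain ⟨ho, h2, hx⟩ := hc
          rw [pv_inM_eq] at ho hx
          have hdel := pv_bal_del s i h2 ho hx hb
          have hf' : 3 * (s.take i ++ s.drop (i + 2)).length - (i - 1) < fuel := by
            simp only [List.length_append, List.length_take, List.length_drop]
            omega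
          have hP' : ∀ j, j + 1 ≤ i - 1 → j + 1 < (s.take i ++ s.drop (i + 2)).length →
              pvInM (s.take i ++ s.drop (i + 2)) j = true →
              pvInM (s.take i ++ s.drop (i + 2)) (j + 1) = true := by
            intro j hj hjl
            have hget : ∀ m, m < i → (s.take i ++ s.drop (i + 2)).getD m ' ' = s.getD m ' ' := by
              intro m hm
              rw [List.getD_eq_getElem?_getD, List.getElem?_append_left (by simp; omega),
                List.getElem?_take_of_lt hm, ← List.getD_eq_getElem?_getD]
            rw [pv_inM_eq, pv_inM_eq, hget j (by omega), hget (j + 1) (by omega),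
              ← pv_inM_eq, ← pv_inM_eq]
            exact hP j (by omega) (by omega)
          obtain ⟨b1, b2, b3⟩ := ih _ _ hf' hP' hdel
          refine ⟨b1, fun init => ?_, b3⟩
          rw [b2 init, pv_foldl_del s i h2 ho hx init]
        · rw [pvLoop, if_pos h, if_neg hc]
          push Not at hc
          have hP' : ∀ j, j + 1 ≤ i + 1 → j + 1 < s.length → pvInM s j = true →
              pvInM s (j + 1) = true := by
            intro j hj hjl hopen
            by_cases hji : j + 1 ≤ i
            · exact hP j hji hjl hopen
            · have hje : i = j := by omega
              subst hje
              by_cases hii : pvInM s i = true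
              · have := hc hii hjl
                simpa using this
              · exact absurd hopen hii
          exact ih _ _ (by omega) hP' hb
      · rw [pvLoop, if_neg h]
        refine ⟨hb, fun _ => rfl, fun j hjl hopen => ?_⟩
        exact hP j (by omega) hjl hopen

-- a balanced residue with no (opener, non-opener) pair consists of openers only
theorem pv_all_open (s : List Char)
    (hnp : ∀ j, j + 1 < s.length → pvInM s j = true → pvInM s (j + 1) = true)
    (hb : pvBal s) : ∀ j, j < s.length → pvIsOpen (s.getD j ' ') = true := by
  intro j
  induction j with
  | zero =>
      intro hj
      have h1 := hb 1
      cases s with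
      | nil => simp at hj
      | cons c rest =>
          simp only [List.take_succ_cons, List.take_zero, List.length_cons,
            List.countP_cons, List.countP_nil, List.length_nil] at h1
          cases hco : pvIsOpen c with
          | true => simp [hco]
          | false => rw [hco] at h1; simp at h1
  | succ j ihj =>
      intro hj
      have hjo := ihj (by omega)
      have := hnp j (by omega) (by rw [pv_inM_eq]; exact hjo)
      rw [pv_inM_eq] at this
      exact this

theorem pv_foldl_open (s : List Char) (h : ∀ c ∈ s, pvIsOpen c = true) :
    ∀ init : List Char, s.foldl pvStepA init = s.reverse ++ init := by
  induction s with
  | nil => intro init; simp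
  | cons c rest ih =>
      intro init
      have hc := h c (by simp)
      have hstep : pvStepA init c = c :: init := by simp [pvStepA, hc]
      simp only [List.foldl_cons, hstep]
      rw [ih (fun x hx => h x (by simp [hx])) (c :: init)]
      simp

-- ===== VERDICT (by name: the statement is the Claim_ definition above) =====
theorem get_autocomplete_spec : Claim_equal_get_autocomplete := by
  intro line _ hpre
  unfold Spec_get_autocomplete get_autocomplete get_autocomplete_alt
  have hb : pvBal line.toList := by
    intro n
    exact hpre _ ((List.mem_inits _ _).mpr (List.take_prefix n line.toList))
  obtain ⟨b1, b2, b3⟩ := pv_loop_main (3 * line.toList.length + 1) line.toList 0 (by omega) (by omega) hb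
  have hall : ∀ c ∈ pvLoop (3 * line.toList.length + 1) line.toList 0, pvIsOpen c = true := by
    intro c hc
    obtain ⟨j, hj, rfl⟩ := List.getElem_of_mem hc
    have := pv_all_open _ b3 b1 j hj
    rwa [List.getD_eq_getElem _ ' ' hj] at this
  rw [pv_drain_eq_map, ← b2 [], pv_foldl_open _ hall []]
  simp
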